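-- pv_equiv track=rewrite | github.com/yuvalamar1/NumericalAnalys | first_upload.py | maxMatrix
-- ===== SOURCE A (Python) =====
-- def unit_matrix(n):
--     result = []
--     temp = []
--     for i in range(n):
--         for j in range(n):
--             if i == j:
--                 temp.append(1)
--             else:
--                 temp.append(0)
--         result.append(temp)
--         temp = []
--     return result
--
-- def multiplymatrix(x,y):
--     result = []
--     temp = []
--     for i in range(len(x)):
--         for i in range(len(y[0])):
--             temp.append(0)
--         result.append(temp)
--         temp = []
--
--     # iterate through rows of X
--     for i in range(len(x)):
--    # iterate through columns of Y
--         for j in range(len(y[0])):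
--        # iterate through rows of Y
--             for k in range(len(y)):
--                 result[i][j] += x[i][k] * y[k][j]
--
--     return result
--
-- def maxMatrix(M,V):
--     for i in range(len(M)):
--         temp=[]
--         for j in range(len(M)):
--             if i<=j:
--                 temp.append(abs(M[j][i]))
--         x=max(temp)
--
--         p=temp.index(x)+i
--         k=unit_matrix(len(M))
--         k[p],k[i]=k[i],k[p]
--         M=multiplymatrix(k,M)
--         V=multiplymatrix(k,V)
--     return M,V
-- ===== SOURCE B (Python) =====
-- def maxMatrix(M, V):
--     M = [row[:] for row in M]
--     V = [row[:] for row in V]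
--     n = len(M)
--     for i in range(n):
--         p = i
--         for j in range(i + 1, n):
--             if abs(M[j][i]) > abs(M[p][i]):
--                 p = j
--         M[i], M[p] = M[p], M[i]
--         V[i], V[p] = V[p], V[i]
--     return M, V
-- ===== Notes on version B (the rewrite author's own statement) =====
-- stated objective: faster
-- what changed: B replaces each build-a-permutation-matrix-and-multiply step (O(n^3) per pivot) with a first-argmax scan of the column and a direct row swap, giving O(n^2) total instead of O(n^4).
-- outside the precondition, e.g. on maxMatrix([[1, 2], [3, 4]], [[5]]): A returns ([[3, 4], [1, 2]], [[0], [5]]), B raises IndexError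
import Mathlib
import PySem

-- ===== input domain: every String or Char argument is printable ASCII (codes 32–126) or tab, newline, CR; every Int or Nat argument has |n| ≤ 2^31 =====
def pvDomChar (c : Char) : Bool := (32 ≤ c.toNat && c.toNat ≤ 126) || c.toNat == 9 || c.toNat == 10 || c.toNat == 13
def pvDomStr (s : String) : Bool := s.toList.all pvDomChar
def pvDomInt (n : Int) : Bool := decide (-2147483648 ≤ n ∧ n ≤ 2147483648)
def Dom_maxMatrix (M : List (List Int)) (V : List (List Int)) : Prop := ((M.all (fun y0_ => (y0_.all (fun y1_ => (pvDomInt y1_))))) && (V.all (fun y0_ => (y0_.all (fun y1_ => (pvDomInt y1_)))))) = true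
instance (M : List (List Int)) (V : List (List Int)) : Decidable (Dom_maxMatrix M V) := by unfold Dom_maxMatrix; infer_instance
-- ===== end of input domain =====

-- B replaces A's permutation-matrix multiplications with a direct argmax scan and row swap
-- (O(n^2) total instead of O(n^4)); A and B return equal values on the stated domain.


-- ===== PORT A =====
def unitMatrix (n : Int) : List (List Int) :=
  (PySem.List.pyRange 0 n 1).foldl (fun result i =>
    result ++ [(PySem.List.pyRange 0 n 1).foldl (fun temp j =>
      temp ++ [if i = j then (1 : Int) else 0]) []]) []

def multiplymatrix (x : List (List Int)) (y : List (List Int)) : List (List Int) :=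
  let c : Int := (PySem.List.pyGetD y 0 []).length
  let init := (PySem.List.pyRange 0 (x.length : Int) 1).foldl (fun result _ =>
    result ++ [(PySem.List.pyRange 0 c 1).foldl (fun temp _ => temp ++ [(0 : Int)]) []]) []
  (PySem.List.pyRange 0 (x.length : Int) 1).foldl (fun result i =>
    (PySem.List.pyRange 0 c 1).foldl (fun result j =>
      (PySem.List.pyRange 0 (y.length : Int) 1).foldl (fun result k =>
        PySem.List.pySetD result i
          (PySem.List.pySetD (PySem.List.pyGetD result i []) j
            (PySem.List.pyGetD (PySem.List.pyGetD result i []) j 0 +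
              PySem.List.pyGetD (PySem.List.pyGetD x i []) k 0 *
              PySem.List.pyGetD (PySem.List.pyGetD y k []) j 0))) result) result) init

def maxMatrix (M : List (List Int)) (V : List (List Int)) : List (List Int) × List (List Int) :=
  (PySem.List.pyRange 0 (M.length : Int) 1).foldl (fun (MV : List (List Int) × List (List Int)) i =>
    let M := MV.1
    let V := MV.2
    let temp := (PySem.List.pyRange 0 (M.length : Int) 1).foldl (fun temp j =>
      if i ≤ j then temp ++ [|PySem.List.pyGetD (PySem.List.pyGetD M j []) i 0|] else temp) []
    let x := (PySem.List.max? temp (fun v => v)).getD 0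
    let p : Int := (((PySem.List.index? temp x).getD 0 : Nat) : Int) + i
    let k := unitMatrix (M.length : Int)
    let k := PySem.List.pySetD (PySem.List.pySetD k p (PySem.List.pyGetD k i []))
               i (PySem.List.pyGetD k p [])
    (multiplymatrix k M, multiplymatrix k V)) (M, V)

-- ===== PORT B =====
def maxMatrix_alt (M : List (List Int)) (V : List (List Int)) : List (List Int) × List (List Int) :=
  let n : Int := M.length
  (PySem.List.pyRange 0 n 1).foldl (fun (MV : List (List Int) × List (List Int)) i =>
    let M := MV.1
    let V := MV.2
    let p := (PySem.List.pyRange (i + 1) n 1).foldl (fun p j =>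
      if |PySem.List.pyGetD (PySem.List.pyGetD M j []) i 0| >
         |PySem.List.pyGetD (PySem.List.pyGetD M p []) i 0| then j else p) i
    let M' := PySem.List.pySetD (PySem.List.pySetD M i (PySem.List.pyGetD M p []))
                p (PySem.List.pyGetD M i [])
    let V' := PySem.List.pySetD (PySem.List.pySetD V i (PySem.List.pyGetD V p []))
                p (PySem.List.pyGetD V i [])
    (M', V')) (M, V)

-- ===== PRECONDITION & SPEC =====
-- Pre_ is the natural domain of partial pivoting: either M is empty (A returns (M, V)
-- immediately) or M's rows all have one width w ≥ len(M), V has as many rows as M and V's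
-- rows all have one width.  Outside it Python A raises an IndexError (too-short rows,
-- too many rows in V), or — on ragged rows all at least as long as row 0, or on V with
-- fewer rows than M — A returns a silently truncated/zero-padded product, a value that is
-- an artefact of multiplymatrix's use of len(y[0]) and that B (which raises or keeps the
-- full rows there) does not reproduce.
def Pre_maxMatrix (M : List (List Int)) (V : List (List Int)) : Prop :=
  M = [] ∨
    (M.all (fun r => r.length = (M.headD []).length) ∧
     M.length ≤ (M.headD []).length ∧
     V.length = M.length ∧
     V.all (fun r => r.length = (V.headD []).length))
instance (M : List (List Int)) (V : List (List Int)) : Decidable (Pre_maxMatrix M V) := by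
  unfold Pre_maxMatrix; infer_instance

def pvWitness_maxMatrix : List (List Int) × List (List Int) :=
  ([[1, 2], [3, 4]], [[5], [6]])

def Spec_maxMatrix (M : List (List Int)) (V : List (List Int)) (out : List (List Int) × List (List Int)) : Prop := out = maxMatrix_alt M V
instance (M : List (List Int)) (V : List (List Int)) (out : List (List Int) × List (List Int)) : Decidable (Spec_maxMatrix M V out) := by unfold Spec_maxMatrix; infer_instance

-- ===== CLAIM (what is proved, stated in full; the proofs are below) =====
def Claim_equal_maxMatrix : Prop := ∀ (M : List (List Int)) (V : List (List Int)), Dom_maxMatrix M V → Pre_maxMatrix M V → Spec_maxMatrix M V (maxMatrix M V)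


-- ===== LEMMAS AND PROOFS =====

-- single-index update: r[i] = f(r[i]) (with default d out of range)
def pvUpd {α : Type} (d : α) (i : Int) (f : α → α) (r : List α) : List α :=
  PySem.List.pySetD r i (f (PySem.List.pyGetD r i d))

lemma length_pvUpd {α : Type} (d : α) (i : Int) (f : α → α) (r : List α) :
    (pvUpd d i f r).length = r.length := PySem.List.length_pySetD _ _ _

lemma pvUpd_comp {α : Type} (d : α) (n : Nat) (f g : α → α) (r : List α) :
    pvUpd d (n : Int) f (pvUpd d (n : Int) g r) = pvUpd d (n : Int) (fun v => f (g v)) r := by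
  by_cases h : n < r.length
  · simp [pvUpd, PySem.List.pySetD_natCast, PySem.List.pyGetD_natCast,
      List.getD_eq_getElem?_getD, h]
  · simp [pvUpd, PySem.List.pySetD_natCast, PySem.List.pyGetD_natCast,
      List.set_eq_of_length_le (Nat.le_of_not_lt h)]

lemma pvUpd_id {α : Type} (d : α) (n : Nat) (r : List α) :
    pvUpd d (n : Int) (fun v => v) r = r := by
  by_cases h : n < r.length
  · simp [pvUpd, PySem.List.pySetD_natCast, PySem.List.pyGetD_natCast,
      List.getD_eq_getElem?_getD, h, List.set_getElem_self]
  · simp [pvUpd, PySem.List.pySetD_natCast,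
      List.set_eq_of_length_le (Nat.le_of_not_lt h)]

lemma foldl_pvUpd {α β : Type} (d : α) (n : Nat) (h : β → α → α) :
    ∀ (l : List β) (init : List α),
      l.foldl (fun r k => pvUpd d (n : Int) (h k) r) init
        = pvUpd d (n : Int) (fun v => l.foldl (fun v k => h k v) v) init := by
  intro l
  induction l with
  | nil => intro init; simp [pvUpd_id]
  | cons k t ih =>
      intro init
      simp only [List.foldl_cons, ih, pvUpd_comp]

lemma pvUpd_append {α : Type} (d : α) (n : Nat) (f : α → α) (xs ys : List α)
    (h : n < xs.length) :
    pvUpd d (n : Int) f (xs ++ ys) = pvUpd d (n : Int) f xs ++ ys := by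
  simp [pvUpd, PySem.List.pySetD_natCast, PySem.List.pyGetD_natCast,
    List.getD_eq_getElem?_getD, List.getElem?_append_left h, List.set_append_left _ _ h]

lemma foldl_pvUpd_append {α : Type} (d : α) (h : Nat → α → α) :
    ∀ (l : List Nat) (init rest : List α), (∀ k ∈ l, k < init.length) →
      l.foldl (fun r (k : Nat) => pvUpd d (k : Int) (h k) r) (init ++ rest)
        = l.foldl (fun r (k : Nat) => pvUpd d (k : Int) (h k) r) init ++ rest := by
  intro l
  induction l with
  | nil => intro init rest _; simp
  | cons k t ih =>
      intro init rest hk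
      simp only [List.foldl_cons]
      rw [pvUpd_append d k _ _ _ (hk k (by simp))]
      exact ih _ rest (fun j hj => by
        rw [length_pvUpd]; exact hk j (by simp [hj]))

lemma pvUpd_append_singleton {α : Type} (d : α) (f : α → α) (L : List α) (z : α) :
    pvUpd d (L.length : Int) f (L ++ [z]) = L ++ [f z] := by
  simp [pvUpd, PySem.List.pySetD_natCast, PySem.List.pyGetD_natCast,
    List.getD_eq_getElem?_getD]

lemma foldl_pvUpd_map_range {α : Type} (d : α) (h : Nat → α → α) (z : α) :
    ∀ n : Nat,
      (List.range n).foldl (fun r (k : Nat) => pvUpd d (k : Int) (h k) r)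
          ((List.range n).map (fun _ => z))
        = (List.range n).map (fun k => h k z) := by
  intro n
  induction n with
  | zero => simp
  | succ n ih =>
      rw [List.range_succ, List.map_append, List.map_append, List.foldl_append]
      rw [foldl_pvUpd_append d h _ _ _ (by intro k hk; simp_all [List.mem_range])]
      rw [ih]
      simp only [List.foldl_cons, List.foldl_nil, List.map_cons, List.map_nil]
      have hL : (List.map (fun k => h k z) (List.range n)).length = n := by simp
      have hE := pvUpd_append_singleton d (h n) (List.map (fun k => h k z) (List.range n)) z
      rw [hL] at hE
      exact hE

lemma foldl_pyRange_zero_nat {α : Type} (m : Nat) (F : α → Int → α) (init : α) :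
    (PySem.List.pyRange 0 (m : Int) 1).foldl F init
      = (List.range m).foldl (fun r (k : Nat) => F r (k : Int)) init := by
  rw [PySem.List.pyRange_zero_natCast, List.foldl_map]

lemma map_pyRange_zero_nat {α : Type} (m : Nat) (F : Int → α) :
    (PySem.List.pyRange 0 (m : Int) 1).map F = (List.range m).map (fun (k : Nat) => F (k : Int)) := by
  rw [PySem.List.pyRange_zero_natCast, List.map_map]
  rfl

-- the (i,j) entry accumulated by multiplymatrix's innermost loop
def pvS (x y : List (List Int)) (i j : Int) : Int :=
  ((PySem.List.pyRange 0 (y.length : Int) 1).map (fun k =>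
    PySem.List.pyGetD (PySem.List.pyGetD x i []) k 0 *
    PySem.List.pyGetD (PySem.List.pyGetD y k []) j 0)).sum

lemma mm_inner (x y : List (List Int)) (ki kj : Nat) (r : List (List Int)) :
    (List.range y.length).foldl (fun r (kk : Nat) =>
        PySem.List.pySetD r (ki : Int)
          (PySem.List.pySetD (PySem.List.pyGetD r (ki : Int) []) (kj : Int)
            (PySem.List.pyGetD (PySem.List.pyGetD r (ki : Int) []) (kj : Int) 0 +
              PySem.List.pyGetD (PySem.List.pyGetD x (ki : Int) []) (kk : Int) 0 *
              PySem.List.pyGetD (PySem.List.pyGetD y (kk : Int) []) (kj : Int) 0))) r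
      = pvUpd [] (ki : Int) (pvUpd 0 (kj : Int) (fun v => v + pvS x y ki kj)) r := by
  have h1 : (fun (r : List (List Int)) (kk : Nat) =>
        PySem.List.pySetD r (ki : Int)
          (PySem.List.pySetD (PySem.List.pyGetD r (ki : Int) []) (kj : Int)
            (PySem.List.pyGetD (PySem.List.pyGetD r (ki : Int) []) (kj : Int) 0 +
              PySem.List.pyGetD (PySem.List.pyGetD x (ki : Int) []) (kk : Int) 0 *
              PySem.List.pyGetD (PySem.List.pyGetD y (kk : Int) []) (kj : Int) 0)))
      = (fun r (kk : Nat) => pvUpd [] (ki : Int)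
          (fun row => pvUpd 0 (kj : Int) (fun v => v +
            PySem.List.pyGetD (PySem.List.pyGetD x (ki : Int) []) (kk : Int) 0 *
            PySem.List.pyGetD (PySem.List.pyGetD y (kk : Int) []) (kj : Int) 0) row) r) := rfl
  rw [h1, foldl_pvUpd]
  congr 1
  funext row
  rw [foldl_pvUpd]
  congr 1
  funext v
  rw [PySem.List.foldl_add]
  simp [pvS, map_pyRange_zero_nat]

lemma mm_spec (x y : List (List Int)) :
    multiplymatrix x y = (List.range x.length).map (fun (ki : Nat) =>
      (List.range (PySem.List.pyGetD y 0 []).length).map (fun (kj : Nat) =>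
        pvS x y (ki : Int) (kj : Int))) := by
  simp only [multiplymatrix]
  rw [PySem.List.foldl_append_singleton_eq_map, PySem.List.foldl_append_singleton_eq_map]
  rw [map_pyRange_zero_nat (F := fun _ => (0 : Int))]
  simp only [List.nil_append]
  rw [map_pyRange_zero_nat (F := fun _ => (List.range (PySem.List.pyGetD y 0 []).length).map (fun (_ : Nat) => (0 : Int)))]
  rw [foldl_pyRange_zero_nat]
  have hstep : ∀ (r : List (List Int)) (ki : Nat), ki ∈ List.range x.length →
      (PySem.List.pyRange 0 ((PySem.List.pyGetD y 0 []).length : Int) 1).foldl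
        (fun result j =>
          (PySem.List.pyRange 0 (y.length : Int) 1).foldl
            (fun result k_1 =>
              PySem.List.pySetD result (ki : Int)
                (PySem.List.pySetD (PySem.List.pyGetD result (ki : Int) []) j
                  (PySem.List.pyGetD (PySem.List.pyGetD result (ki : Int) []) j 0 +
                    PySem.List.pyGetD (PySem.List.pyGetD x (ki : Int) []) k_1 0 *
                      PySem.List.pyGetD (PySem.List.pyGetD y k_1 []) j 0))) result) r
      = pvUpd [] (ki : Int) (fun row => (List.range (PySem.List.pyGetD y 0 []).length).foldl
          (fun row (kj : Nat) => pvUpd 0 (kj : Int) (fun v => v + pvS x y ki kj) row) row) r := by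
    intro r ki _
    rw [foldl_pyRange_zero_nat]
    have h2 : ∀ (r' : List (List Int)) (kj : Nat), kj ∈ List.range (PySem.List.pyGetD y 0 []).length →
        (PySem.List.pyRange 0 (y.length : Int) 1).foldl
          (fun result k_1 =>
            PySem.List.pySetD result (ki : Int)
              (PySem.List.pySetD (PySem.List.pyGetD result (ki : Int) []) (kj : Int)
                (PySem.List.pyGetD (PySem.List.pyGetD result (ki : Int) []) (kj : Int) 0 +
                  PySem.List.pyGetD (PySem.List.pyGetD x (ki : Int) []) k_1 0 *
                    PySem.List.pyGetD (PySem.List.pyGetD y k_1 []) (kj : Int) 0))) r'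
        = pvUpd [] (ki : Int) (pvUpd 0 (kj : Int) (fun v => v + pvS x y ki kj)) r' := by
      intro r' kj _
      rw [foldl_pyRange_zero_nat]
      exact mm_inner x y ki kj r'
    refine (PySem.List.foldl_congr_mem _ _
      (fun r' (kj : Nat) => pvUpd [] (ki : Int)
        (pvUpd 0 (kj : Int) (fun v => v + pvS x y (ki : Int) (kj : Int))) r') _ h2).trans ?_
    exact foldl_pvUpd (β := Nat) [] ki
      (fun kj => pvUpd 0 (kj : Int) (fun v => v + pvS x y (ki : Int) (kj : Int))) _ r
  refine (PySem.List.foldl_congr_mem _ _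
    (fun r (ki : Nat) => pvUpd [] (ki : Int)
      (fun row => (List.range (PySem.List.pyGetD y 0 []).length).foldl
        (fun row (kj : Nat) => pvUpd 0 (kj : Int) (fun v => v + pvS x y (ki : Int) (kj : Int)) row) row) r) _ hstep).trans ?_
  rw [foldl_pvUpd_map_range]
  congr 1
  funext ki
  rw [foldl_pvUpd_map_range 0 (fun kj v => v + pvS x y ki kj) 0]
  simp

lemma unit_spec (n : Nat) : unitMatrix (n : Int) = (List.range n).map (fun (a : Nat) =>
    (List.range n).map (fun (b : Nat) => if a = b then (1 : Int) else 0)) := by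
  simp only [unitMatrix]
  rw [PySem.List.foldl_append_singleton_eq_map]
  simp only [List.nil_append]
  rw [map_pyRange_zero_nat]
  congr 1
  funext a
  rw [PySem.List.foldl_append_singleton_eq_map]
  simp only [List.nil_append]
  rw [map_pyRange_zero_nat]
  congr 1
  funext b
  simp

lemma sum_delta (f : Nat → Int) : ∀ (n s : Nat), s < n →
    ((List.range n).map (fun k => (if s = k then (1 : Int) else 0) * f k)).sum = f s := by
  intro n
  induction n with
  | zero => omega
  | succ n ih =>
      intro s hs
      rw [List.range_succ, List.map_append, List.sum_append]
      by_cases h : s = n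
      · subst h
        have h1 : ((List.range s).map (fun k => (if s = k then (1 : Int) else 0) * f k)).sum = 0 := by
          apply List.sum_eq_zero
          intro v hv
          obtain ⟨k, hk, rfl⟩ := List.mem_map.mp hv
          have : s ≠ k := by rw [List.mem_range] at hk; omega
          simp [this]
        rw [h1]
        simp
      · have h2 : s < n := by omega
        rw [ih s h2]
        simp [h]

lemma map_getD_range_self (r : List Int) : (List.range r.length).map (fun j => r.getD j 0) = r := by
  apply List.ext_getElem
  · simp
  · intro j h1 h2
    simp [List.getD_eq_getElem?_getD, List.getElem?_eq_getElem h2]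

-- the row-swap permutation matrix A builds (unit matrix with rows p and i exchanged)
def pvSigma (i p a : Nat) : Nat := if a = i then p else if a = p then i else a

def pvK (n i p : Nat) : List (List Int) :=
  PySem.List.pySetD
    (PySem.List.pySetD (unitMatrix (n : Int)) (p : Int)
      (PySem.List.pyGetD (unitMatrix (n : Int)) (i : Int) []))
    (i : Int) (PySem.List.pyGetD (unitMatrix (n : Int)) (p : Int) [])

lemma length_pvK (n i p : Nat) : (pvK n i p).length = n := by
  simp [pvK, unit_spec]

lemma unit_row (n r : Nat) (hr : r < n) :
    PySem.List.pyGetD (unitMatrix (n : Int)) (r : Int) []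
      = (List.range n).map (fun (b : Nat) => if r = b then (1 : Int) else 0) := by
  rw [unit_spec, PySem.List.pyGetD_natCast]
  exact PySem.List.getD_map_range _ _ _ _ hr

lemma pvK_row (n i p a : Nat) (hi : i < n) (hp : p < n) (ha : a < n) :
    PySem.List.pyGetD (pvK n i p) (a : Int) []
      = (List.range n).map (fun (b : Nat) => if pvSigma i p a = b then (1 : Int) else 0) := by
  have hlen : (PySem.List.pySetD (unitMatrix (n : Int)) (p : Int)
      (PySem.List.pyGetD (unitMatrix (n : Int)) (i : Int) [])).length = n := by
    simp [unit_spec]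
  unfold pvK
  rw [PySem.List.pyGetD_pySetD_natCast _ i a _ _ (by rw [hlen]; exact hi)]
  by_cases hai : a = i
  · simp only [hai]
    rw [unit_row n p hp]
    simp [pvSigma]
  · rw [if_neg hai]
    rw [PySem.List.pyGetD_pySetD_natCast _ p a _ _ (by simp [unit_spec, hp])]
    by_cases hap : a = p
    · rw [if_pos hap, unit_row n i hi]
      have hs : pvSigma i p a = i := by simp [pvSigma, hap]
      rw [hs]
    · rw [if_neg hap, unit_row n a ha]
      simp [pvSigma, hai, hap]

lemma pvK_entry (n i p a b : Nat) (hi : i < n) (hp : p < n) (ha : a < n) (hb : b < n) :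
    PySem.List.pyGetD (PySem.List.pyGetD (pvK n i p) (a : Int) []) (b : Int) 0
      = if pvSigma i p a = b then (1 : Int) else 0 := by
  rw [pvK_row n i p a hi hp ha, PySem.List.pyGetD_natCast]
  exact PySem.List.getD_map_range _ _ _ _ hb

lemma pvS_pvK (y : List (List Int)) (n i p a : Nat) (j : Int)
    (hyL : y.length = n) (hi : i < n) (hp : p < n) (ha : a < n) :
    pvS (pvK n i p) y (a : Int) j
      = PySem.List.pyGetD (PySem.List.pyGetD y ((pvSigma i p a : Nat) : Int) []) j 0 := by
  have hσ : pvSigma i p a < n := by unfold pvSigma; split_ifs <;> omega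
  unfold pvS
  rw [map_pyRange_zero_nat, hyL]
  have hcong : ∀ k ∈ List.range n,
      PySem.List.pyGetD (PySem.List.pyGetD (pvK n i p) (a : Int) []) (k : Int) 0 *
        PySem.List.pyGetD (PySem.List.pyGetD y (k : Int) []) j 0
      = (if pvSigma i p a = k then (1 : Int) else 0) *
        PySem.List.pyGetD (PySem.List.pyGetD y (k : Int) []) j 0 := by
    intro k hk
    rw [pvK_entry n i p a k hi hp ha (List.mem_range.mp hk)]
  rw [List.map_congr_left hcong]
  exact sum_delta _ n (pvSigma i p a) hσ

lemma mm_pvK_swap (y : List (List Int)) (n i p w : Nat)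
    (hyL : y.length = n) (hw : ∀ r ∈ y, r.length = w)
    (hi : i < n) (hp : p < n) :
    multiplymatrix (pvK n i p) y
      = PySem.List.pySetD (PySem.List.pySetD y (i : Int) (PySem.List.pyGetD y (p : Int) []))
          (p : Int) (PySem.List.pyGetD y (i : Int) []) := by
  have hn0 : 0 < n := by omega
  have hc : (PySem.List.pyGetD y 0 []).length = w := by
    apply hw
    apply PySem.List.pyGetD_mem
    simp [PySem.Raise.InRange, hyL]; omega
  rw [mm_spec, length_pvK]
  simp only [PySem.List.pySetD_natCast]
  apply List.ext_getElem
  · simp [hyL]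
  · intro a h1 h2
    have ha : a < n := by simpa using h1
    rw [List.getElem_map]
    simp only [List.getElem_range]
    have hσ : pvSigma i p a < n := by unfold pvSigma; split_ifs <;> omega
    have hrow : ∀ (r : Nat) (hr : r < n), (List.range (PySem.List.pyGetD y 0 []).length).map
        (fun (kj : Nat) => PySem.List.pyGetD (PySem.List.pyGetD y ((r : Nat) : Int) []) (kj : Int) 0)
        = y[r]'(by omega) := by
      intro r hr
      have hmem : y[r]'(by omega) ∈ y := List.getElem_mem _
      have hrl : (y[r]'(by omega)).length = w := hw _ hmem
      have hget : PySem.List.pyGetD y ((r : Nat) : Int) [] = y[r]'(by omega) := by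
        rw [PySem.List.pyGetD_natCast]
        simp [List.getD_eq_getElem?_getD, List.getElem?_eq_getElem (by omega : r < y.length)]
      rw [hget, hc, ← hrl]
      simp only [PySem.List.pyGetD_natCast]
      exact map_getD_range_self _
    have hstep : (List.range (PySem.List.pyGetD y 0 []).length).map
        (fun (kj : Nat) => pvS (pvK n i p) y (a : Int) (kj : Int))
        = y[pvSigma i p a]'(by omega) := by
      rw [← hrow (pvSigma i p a) hσ]
      apply List.map_congr_left
      intro kj _
      exact pvS_pvK y n i p a (kj : Int) hyL hi hp ha
    rw [hstep]
    have hgi : PySem.List.pyGetD y ((i : Nat) : Int) [] = y[i]'(by omega) := by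
      rw [PySem.List.pyGetD_natCast]
      simp [List.getD_eq_getElem?_getD, List.getElem?_eq_getElem (by omega : i < y.length)]
    have hgp : PySem.List.pyGetD y ((p : Nat) : Int) [] = y[p]'(by omega) := by
      rw [PySem.List.pyGetD_natCast]
      simp [List.getD_eq_getElem?_getD, List.getElem?_eq_getElem (by omega : p < y.length)]
    simp only [hgi, hgp]
    rw [List.getElem_set, List.getElem_set]
    unfold pvSigma
    by_cases hai : a = i
    · subst hai
      by_cases hpa : p = a
      · subst hpa
        simp
      · simp [hpa]
    · have h3 : ¬ i = a := fun h => hai h.symm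
      by_cases hap : a = p
      · subst hap
        simp [hai]
      · have h4 : ¬ p = a := fun h => hap h.symm
        simp [hai, hap, h3, h4]

lemma filter_pyRange_le (i n : Int) (h0 : 0 ≤ i) (hn : i ≤ n) :
    (PySem.List.pyRange 0 n 1).filter (fun j => decide (i ≤ j)) = PySem.List.pyRange i n 1 := by
  rw [PySem.List.pyRange_one_append 0 i n h0 hn, List.filter_append]
  have h1 : (PySem.List.pyRange 0 i 1).filter (fun j => decide (i ≤ j)) = [] := by
    rw [List.filter_eq_nil_iff]
    intro x hx
    rw [PySem.List.mem_pyRange_one] at hx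
    simp
    omega
  have h2 : (PySem.List.pyRange i n 1).filter (fun j => decide (i ≤ j)) = PySem.List.pyRange i n 1 := by
    rw [List.filter_eq_self]
    intro x hx
    rw [PySem.List.mem_pyRange_one] at hx
    simp
    omega
  rw [h1, h2, List.nil_append]

lemma temp_eq (f : Int → Int) (i n : Int) (h0 : 0 ≤ i) (hn : i ≤ n) :
    (PySem.List.pyRange 0 n 1).foldl (fun temp j => if i ≤ j then temp ++ [f j] else temp) []
      = (PySem.List.pyRange i n 1).map f := by
  rw [PySem.List.foldl_append_ite (fun j => i ≤ j) f, filter_pyRange_le i n h0 hn, List.nil_append]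

lemma max?_id_append_singleton (xs : List Int) (v : Int) (hne : xs ≠ []) :
    PySem.List.max? (xs ++ [v]) (fun u => u)
      = some (max ((PySem.List.max? xs (fun u => u)).getD 0) v) := by
  obtain ⟨h, t, rfl⟩ := List.exists_cons_of_ne_nil hne
  rw [List.cons_append, PySem.List.max?_id_cons, PySem.List.max?_id_cons]
  simp [List.foldl_append]

-- A's "index of the column maximum" equals B's first-argmax fold
lemma pivot_eq (f : Int → Int) : ∀ (m : Nat) (a : Int),
    ((((PySem.List.index? ((PySem.List.pyRange a (a + 1 + m) 1).map f)
        ((PySem.List.max? ((PySem.List.pyRange a (a + 1 + m) 1).map f) (fun v => v)).getD 0)).getD 0 : Nat) : Int) + a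
      = (PySem.List.pyRange (a + 1) (a + 1 + m) 1).foldl (fun p j => if f j > f p then j else p) a)
  ∧ f ((PySem.List.pyRange (a + 1) (a + 1 + m) 1).foldl (fun p j => if f j > f p then j else p) a)
      = (PySem.List.max? ((PySem.List.pyRange a (a + 1 + m) 1).map f) (fun v => v)).getD 0 := by
  intro m
  induction m with
  | zero =>
      intro a
      have h1 : (a : Int) + 1 + (0 : Nat) = a + 1 := by push_cast; ring
      rw [h1, PySem.List.pyRange_one_singleton, PySem.List.pyRange_one_eq_nil (le_refl (a + 1))]
      rw [List.map_singleton, PySem.List.max?_id_cons]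
      simp
  | succ m ih =>
      intro a
      have hb : (a : Int) + 1 + ((m : Nat) + 1 : Nat) = (a + 1 + (m : Nat)) + 1 := by push_cast; ring
      set b : Int := a + 1 + (m : Nat) with hbdef
      rw [hb]
      rw [PySem.List.pyRange_one_succ_right (by omega : a ≤ b),
          PySem.List.pyRange_one_succ_right (by omega : a + 1 ≤ b)]
      rw [List.map_append, List.map_singleton, List.foldl_append]
      simp only [List.foldl_cons, List.foldl_nil]
      obtain ⟨ihIdx, ihVal⟩ := ih a
      set T := (PySem.List.pyRange a b 1).map f with hT
      set r := (PySem.List.pyRange (a + 1) b 1).foldl (fun p j => if f j > f p then j else p) a with hr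
      have hTlen : T.length = m + 1 := by
        rw [hT, List.length_map, PySem.List.length_pyRange_one]
        omega
      have hTne : T ≠ [] := by
        intro hc
        rw [hc] at hTlen
        simp at hTlen
      obtain ⟨x, hx⟩ : ∃ x, PySem.List.max? T (fun v => v) = some x := by
        cases hmc : PySem.List.max? T (fun v => v) with
        | none => exact absurd ((PySem.List.max?_eq_none_iff _ _).mp hmc) hTne
        | some x => exact ⟨x, rfl⟩
      rw [max?_id_append_singleton T (f b) hTne, hx]
      simp only [Option.getD_some]
      rw [hx] at ihIdx ihVal
      simp only [Option.getD_some] at ihIdx ihVal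
      by_cases hv : f b > f r
      · have hvx : x < f b := by rw [← ihVal]; exact hv
        have hmax : max x (f b) = f b := max_eq_right (le_of_lt hvx)
        rw [hmax]
        have hnotmem : f b ∉ T := by
          intro hmem
          have := PySem.List.max?_isMax hx (f b) hmem
          simp at this
          omega
        rw [PySem.List.index?_append_singleton_self T (f b) hnotmem]
        constructor
        · rw [if_pos hv]
          simp only [Option.getD_some]
          rw [hTlen]
          push_cast
          omega
        · rw [if_pos hv]
      · have hvx : f b ≤ x := by rw [← ihVal]; omega
        have hmax : max x (f b) = x := max_eq_left hvx
        rw [hmax]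
        have hmem : x ∈ T := PySem.List.max?_mem hx
        rw [PySem.List.index?_append_of_mem [f b] hmem]
        constructor
        · rw [if_neg hv]
          exact ihIdx
        · rw [if_neg hv]
          exact ihVal

lemma foldl_eq_of_inv {σα β : Type} (Inv : σα → Prop) (fA fB : σα → β → σα) :
    ∀ (l : List β) (s : σα), Inv s →
      (∀ s b, b ∈ l → Inv s → fA s b = fB s b ∧ Inv (fB s b)) →
      l.foldl fA s = l.foldl fB s := by
  intro l
  induction l with
  | nil => intros; rfl
  | cons b t ih =>
      intro s hs h
      simp only [List.foldl_cons]
      obtain ⟨heq, hinv⟩ := h s b (by simp) hs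
      rw [heq]
      exact ih _ hinv (fun s' b' hb' hs' => h s' b' (by simp [hb']) hs')

lemma mem_of_pyGetD_mem {α : Type} (xs : List α) (k : Nat) (d : α) (hk : k < xs.length) :
    PySem.List.pyGetD xs (k : Int) d ∈ xs := by
  apply PySem.List.pyGetD_mem
  simp [PySem.Raise.InRange]
  omega

-- ===== VERDICT (by name: the statement is the Claim_ definition above) =====
theorem maxMatrix_spec : Claim_equal_maxMatrix := by
  unfold Claim_equal_maxMatrix Spec_maxMatrix
  intro M V _ hpre
  rcases hpre with hM0 | ⟨hMuni, hMw, hVL, hVuni⟩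
  · subst hM0
    rfl
  · have hMu : ∀ r ∈ M, r.length = (M.headD []).length := by
      intro r hr
      simpa using (List.all_eq_true.mp hMuni r hr)
    have hVu : ∀ r ∈ V, r.length = (V.headD []).length := by
      intro r hr
      simpa using (List.all_eq_true.mp hVuni r hr)
    simp only [maxMatrix, maxMatrix_alt]
    apply foldl_eq_of_inv
      (Inv := fun s => s.1.length = M.length ∧ s.2.length = M.length ∧
        (∀ r ∈ s.1, r.length = (M.headD []).length) ∧
        (∀ r ∈ s.2, r.length = (V.headD []).length))
    · exact ⟨rfl, hVL, hMu, hVu⟩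
    · rintro ⟨Mc, Vc⟩ i hi ⟨hMcL, hVcL, hMcU, hVcU⟩
      rw [PySem.List.mem_pyRange_one] at hi
      obtain ⟨hi0, hin⟩ := hi
      dsimp only at hMcL hVcL hMcU hVcU ⊢
      set n := M.length with hn
      set w := (M.headD []).length with hwdef
      set wV := (V.headD []).length with hwVdef
      set f : Int → Int := fun j =>
        |PySem.List.pyGetD (PySem.List.pyGetD Mc j []) i 0| with hf
      have hiN : i = ((i.toNat : Nat) : Int) := (Int.toNat_of_nonneg hi0).symm
      set iN := i.toNat with hiNdef
      have hiNn : iN < n := by omega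
      set m : Nat := n - iN - 1 with hm
      have hnm : (n : Int) = i + 1 + (m : Nat) := by omega
      have htemp : (PySem.List.pyRange 0 (Mc.length : Int) 1).foldl
          (fun temp j => if i ≤ j then temp ++ [f j] else temp) []
          = (PySem.List.pyRange i (i + 1 + (m : Nat)) 1).map f := by
        rw [hMcL, hnm, temp_eq f i _ hi0 (by omega)]
      obtain ⟨hidx, hval⟩ := pivot_eq f m i
      set T := (PySem.List.pyRange i (i + 1 + (m : Nat)) 1).map f with hT
      set x := (PySem.List.max? T (fun v => v)).getD 0 with hx
      set idx := (PySem.List.index? T x).getD 0 with hidxdef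
      set pB := (PySem.List.pyRange (i + 1) (i + 1 + (m : Nat)) 1).foldl
        (fun p j => if f j > f p then j else p) i with hpB
      have hTlen : T.length = m + 1 := by
        rw [hT, List.length_map, PySem.List.length_pyRange_one]
        omega
      have hTne : T ≠ [] := by
        intro hc
        rw [hc] at hTlen
        simp at hTlen
      obtain ⟨x0, hx0⟩ : ∃ x0, PySem.List.max? T (fun v => v) = some x0 := by
        cases hmc : PySem.List.max? T (fun v => v) with
        | none => exact absurd ((PySem.List.max?_eq_none_iff _ _).mp hmc) hTne
        | some x0 => exact ⟨x0, rfl⟩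
      have hxx0 : x = x0 := by rw [hx, hx0]; rfl
      obtain ⟨k0, hk0⟩ : ∃ k0, PySem.List.index? T x = some k0 := by
        have hmem : x ∈ T := hxx0 ▸ PySem.List.max?_mem hx0
        obtain ⟨k0, hk0⟩ := Option.isSome_iff_exists.mp
          ((PySem.List.index?_isSome_iff _ _).mpr hmem)
        exact ⟨k0, hk0⟩
      have hk0lt : k0 < T.length := by
        obtain ⟨hk, _, _⟩ := PySem.List.getElem_of_index?_eq_some hk0
        exact hk
      have hidxm : idx ≤ m := by
        rw [hidxdef, hk0]
        simp only [Option.getD_some]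
        omega
      set pN : Nat := idx + iN with hpN
      have hpNn : pN < n := by omega
      have hpcast : ((idx : Nat) : Int) + i = ((pN : Nat) : Int) := by
        rw [hpN]
        omega
      have hpBeq : pB = ((pN : Nat) : Int) := by rw [← hidx, hpcast]
      have hkK : PySem.List.pySetD
          (PySem.List.pySetD (unitMatrix (Mc.length : Int)) ((pN : Nat) : Int)
            (PySem.List.pyGetD (unitMatrix (Mc.length : Int)) i []))
          i (PySem.List.pyGetD (unitMatrix (Mc.length : Int)) ((pN : Nat) : Int) [])
          = pvK n iN pN := by
        rw [hMcL, hiN, pvK]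
      have htemp' := htemp
      simp only [hf] at htemp'
      have hpB' := hpB
      simp only [hf] at hpB'
      constructor
      · rw [htemp', ← hx, ← hidxdef, hpcast, hkK]
        rw [mm_pvK_swap Mc n iN pN w hMcL hMcU hiNn hpNn]
        rw [mm_pvK_swap Vc n iN pN wV hVcL hVcU hiNn hpNn]
        rw [hnm, ← hpB', hpBeq, hiN]
      · rw [hnm, ← hpB', hpBeq, hiN]
        refine ⟨?_, ?_, ?_, ?_⟩
        · simp [hMcL]
        · simp [hVcL]
        · intro r hr
          simp only [PySem.List.pySetD_natCast] at hr
          rcases List.mem_or_eq_of_mem_set hr with hr2 | rfl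
          · rcases List.mem_or_eq_of_mem_set hr2 with hr3 | rfl
            · exact hMcU r hr3
            · exact hMcU _ (mem_of_pyGetD_mem Mc pN [] (by omega))
          · exact hMcU _ (mem_of_pyGetD_mem Mc iN [] (by omega))
        · intro r hr
          simp only [PySem.List.pySetD_natCast] at hr
          rcases List.mem_or_eq_of_mem_set hr with hr2 | rfl
          · rcases List.mem_or_eq_of_mem_set hr2 with hr3 | rfl
            · exact hVcU r hr3
            · exact hVcU _ (mem_of_pyGetD_mem Vc pN [] (by omega))
          · exact hVcU _ (mem_of_pyGetD_mem Vc iN [] (by omega))
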